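-- pv_equiv track=rewrite | github.com/shahidul2k9/problem-solution | leetcode/_2178_MaximumSplitOfPositiveEvenIntegers.py | maximumEvenSplit
-- ===== SOURCE A (Python) =====
-- from typing import List
--
-- def maximumEvenSplit(finalSum: int) -> List[int]:
--     even_nums = []
--     if finalSum & 1 == 0:
--         c = 2
--         while finalSum > 0 and finalSum - c > c:
--             even_nums.append(c)
--             finalSum -= c
--             c += 2
--         if finalSum:
--             even_nums.append(finalSum)
--     return even_nums
-- ===== SOURCE B (Python) =====
-- from typing import List
--
-- def maximumEvenSplit(finalSum: int) -> List[int]: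
--     if finalSum <= 0 or finalSum % 2:
--         return []
--     t = 0
--     while (t + 1) * (t + 2) <= finalSum:
--         t += 1
--     return [2 * i for i in range(1, t)] + [finalSum - t * (t - 1)]
-- ===== Notes on version B (the rewrite author's own statement) =====
-- stated objective: alternative
-- what changed: A repeatedly subtracts growing even numbers from finalSum, appending as it goes; B first counts the number of terms t (largest t with t*(t+1) <= finalSum) with a simple arithmetic loop, then generates the answer in closed form as [2,4,...,2(t-1)] plus one absorbing last element.
-- intended difference: On negative even inputs A's unconditional final append returns [finalSum] itself, while B returns [], the intended answer since a negative number has no split into positive distinct even integers. — e.g. on maximumEvenSplit(-2): A returns [-2], B returns []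
import Mathlib
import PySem

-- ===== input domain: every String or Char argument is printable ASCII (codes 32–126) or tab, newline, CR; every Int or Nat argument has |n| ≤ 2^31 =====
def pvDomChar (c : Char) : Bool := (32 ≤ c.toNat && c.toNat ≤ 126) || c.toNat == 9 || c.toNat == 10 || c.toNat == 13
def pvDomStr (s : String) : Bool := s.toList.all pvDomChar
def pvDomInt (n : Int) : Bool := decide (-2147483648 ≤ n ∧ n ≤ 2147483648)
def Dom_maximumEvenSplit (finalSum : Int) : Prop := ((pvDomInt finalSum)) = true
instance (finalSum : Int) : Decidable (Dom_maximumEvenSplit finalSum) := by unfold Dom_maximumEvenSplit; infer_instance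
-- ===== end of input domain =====

-- B replaces A's subtract-and-append loop by a closed-form generation: it first counts the
-- number of terms t (largest t with t*(t+1) ≤ finalSum), then emits 2,4,…,2(t-1) and one
-- absorbing last term; on negative even inputs B returns [] where A returns [finalSum] (see D_).

-- ===== PORT A =====
-- A's while loop: append c, subtract, c += 2; the hypothesis 2 ≤ c only justifies
-- termination (c is always ≥ 2 at every call A makes), it does not alter the computation.
def pvLoopA (s c : Int) (hc : 2 ≤ c) : List Int :=
  if h : s > 0 ∧ s - c > c then
    c :: pvLoopA (s - c) (c + 2) (by omega)
  else
    if s ≠ 0 then [s] else []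
termination_by s.toNat
decreasing_by omega

-- `finalSum & 1 == 0` is ported as `finalSum % 2 == 0` (exact: for every int, n & 1 = n mod 2).
def maximumEvenSplit (finalSum : Int) : List Int :=
  if finalSum % 2 = 0 then pvLoopA finalSum 2 (by omega) else []

-- ===== PORT B =====
-- B's counting while loop: t += 1 while (t+1)*(t+2) ≤ finalSum.
def pvCountT (s : Int) (t : Nat) : Nat :=
  if ((t : Int) + 1) * ((t : Int) + 2) ≤ s then pvCountT s (t + 1) else t
termination_by (s + 1 - ((t : Int) + 1) * ((t : Int) + 2)).toNat
decreasing_by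
  push_cast
  have h12 : ((t : Int) + 1 + 1) * ((t : Int) + 1 + 2) = ((t : Int) + 1) * ((t : Int) + 2) + 2 * ((t : Int) + 2) := by ring
  omega

def maximumEvenSplit_alt (finalSum : Int) : List Int :=
  if finalSum ≤ 0 ∨ finalSum % 2 ≠ 0 then []
  else
    let t := pvCountT finalSum 0
    ((List.range t).drop 1).map (fun i : Nat => 2 * (i : Int)) ++ [finalSum - (t : Int) * ((t : Int) - 1)]

-- ===== PRECONDITION & SPEC =====
-- On negative even inputs A returns [finalSum] (a leftover of its unconditional final append),
-- while B returns [], the intended answer: a negative number has no split into positive even integers.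
def D_maximumEvenSplit (finalSum : Int) : Prop := finalSum < 0 ∧ finalSum % 2 = 0
instance (finalSum : Int) : Decidable (D_maximumEvenSplit finalSum) := by unfold D_maximumEvenSplit; infer_instance

def Spec_maximumEvenSplit (finalSum : Int) (out : List Int) : Prop := ¬ D_maximumEvenSplit finalSum → out = maximumEvenSplit_alt finalSum
instance (finalSum : Int) (out : List Int) : Decidable (Spec_maximumEvenSplit finalSum out) := by unfold Spec_maximumEvenSplit; infer_instance

def pvDiffWitness_maximumEvenSplit : Int := (-2)
def pvDiffWitnessOut_maximumEvenSplit : (List Int) × (List Int) := ([-2], [])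

-- ===== CLAIM (what is proved, stated in full; the proofs are below) =====
def Claim_unchanged_maximumEvenSplit : Prop := ∀ (finalSum : Int), Dom_maximumEvenSplit finalSum → Spec_maximumEvenSplit finalSum (maximumEvenSplit finalSum)
def Claim_changed_maximumEvenSplit : Prop := Dom_maximumEvenSplit (pvDiffWitness_maximumEvenSplit) ∧ D_maximumEvenSplit (pvDiffWitness_maximumEvenSplit) ∧ maximumEvenSplit (pvDiffWitness_maximumEvenSplit) = pvDiffWitnessOut_maximumEvenSplit.1 ∧ maximumEvenSplit_alt (pvDiffWitness_maximumEvenSplit) = pvDiffWitnessOut_maximumEvenSplit.2 ∧ pvDiffWitnessOut_maximumEvenSplit.1 ≠ pvDiffWitnessOut_maximumEvenSplit.2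
def Claim_exact_maximumEvenSplit : Prop := ∀ (finalSum : Int), Dom_maximumEvenSplit finalSum → D_maximumEvenSplit finalSum → maximumEvenSplit finalSum ≠ maximumEvenSplit_alt finalSum

-- ===== LEMMAS AND PROOFS =====

theorem pvLoopA_congr (s c : Int) (h : 2 ≤ c) (s' c' : Int) (h' : 2 ≤ c')
    (hs : s = s') (hc : c = c') : pvLoopA s c h = pvLoopA s' c' h' := by
  subst hs; subst hc; rfl

-- pvCountT's spec: starting from a valid t it returns the largest T with T*(T+1) ≤ s.
theorem pvCountT_spec (s : Int) (t : Nat) (h : ((t : Int)) * ((t : Int) + 1) ≤ s) :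
    (t ≤ pvCountT s t) ∧
    ((pvCountT s t : Int)) * ((pvCountT s t : Int) + 1) ≤ s ∧
    s < ((pvCountT s t : Int) + 1) * ((pvCountT s t : Int) + 2) := by
  fun_induction pvCountT s t with
  | case1 t hg ih =>
    have h' : (((t + 1 : Nat) : Int)) * (((t + 1 : Nat) : Int) + 1) ≤ s := by push_cast; linarith
    obtain ⟨h1, h2, h3⟩ := ih h'
    exact ⟨by omega, h2, h3⟩
  | case2 t hg =>
    exact ⟨le_refl t, h, by linarith⟩

-- Loop invariant: at state (n - k*(k-1), 2k) with 1 ≤ k ≤ T, A's loop emits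
-- 2k,…,2(T-1) and then the absorbing last term n - T*(T-1).
theorem pvLoopA_char (n : Int) (hn2 : n % 2 = 0) (T : Nat)
    (hT1 : 1 ≤ T) (hTle : ((T : Int)) * ((T : Int) + 1) ≤ n)
    (hTgt : n < ((T : Int) + 1) * ((T : Int) + 2)) :
    ∀ (d k : Nat) (hk : 1 ≤ k), k + d = T →
      pvLoopA (n - (k : Int) * ((k : Int) - 1)) (2 * (k : Int)) (by omega) =
        (List.range' k d).map (fun i : Nat => 2 * (i : Int)) ++ [n - (T : Int) * ((T : Int) - 1)] := by
  intro d
  induction d with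
  | zero =>
    intro k hk1 hkT
    have hk' : k = T := by omega
    subst hk'
    rw [pvLoopA]
    have e1 : ((k : Int) + 1) * ((k : Int) + 2) = (k : Int) * (k : Int) + 3 * (k : Int) + 2 := by ring
    have e2 : (k : Int) * ((k : Int) - 1) = (k : Int) * (k : Int) - (k : Int) := by ring
    have e3 : ((k : Int)) * ((k : Int) + 1) = (k : Int) * (k : Int) + (k : Int) := by ring
    obtain ⟨m, hm⟩ : Even ((k : Int) * ((k : Int) + 1)) := Int.even_mul_succ_self _
    have hk1' : (1 : Int) ≤ (k : Int) := by exact_mod_cast hk1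
    have hguard : ¬ (n - (k : Int) * ((k : Int) - 1) > 0 ∧
        n - (k : Int) * ((k : Int) - 1) - 2 * (k : Int) > 2 * (k : Int)) := by omega
    rw [dif_neg hguard, if_pos (by omega)]
    simp
  | succ d ih =>
    intro k hk1 hkT
    have hkT' : (k : Int) + (d : Int) + 1 = (T : Int) := by exact_mod_cast congrArg (Nat.cast (R := Int)) hkT
    have hk1' : (1 : Int) ≤ (k : Int) := by exact_mod_cast hk1
    have hmono : ((k : Int) + 1) * ((k : Int) + 2) ≤ ((T : Int)) * ((T : Int) + 1) := by nlinarith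
    rw [pvLoopA]
    have e1 : ((k : Int) + 1) * ((k : Int) + 2) = (k : Int) * (k : Int) + 3 * (k : Int) + 2 := by ring
    have e2 : (k : Int) * ((k : Int) - 1) = (k : Int) * (k : Int) - (k : Int) := by ring
    have hTprod : (k : Int) * (k : Int) + 3 * (k : Int) + 2 ≤ n := by omega
    have hguard : (n - (k : Int) * ((k : Int) - 1) > 0 ∧
        n - (k : Int) * ((k : Int) - 1) - 2 * (k : Int) > 2 * (k : Int)) := by omega
    rw [dif_pos hguard]
    have harg : n - (k : Int) * ((k : Int) - 1) - 2 * (k : Int) = n - ((k + 1 : Nat) : Int) * (((k + 1 : Nat) : Int) - 1) := by push_cast; ring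
    have hc : 2 * (k : Int) + 2 = 2 * ((k + 1 : Nat) : Int) := by push_cast; ring
    rw [List.range'_succ, List.map_cons, List.cons_append]
    refine congrArg₂ List.cons rfl ?_
    have hih := ih (k + 1) (by omega) (by omega)
    exact (pvLoopA_congr _ _ _ _ _ _ harg hc).trans hih

theorem rangeDrop (T : Nat) (h : 1 ≤ T) : (List.range T).drop 1 = List.range' 1 (T - 1) := by
  obtain ⟨T', rfl⟩ : ∃ T', T = T' + 1 := ⟨T - 1, by omega⟩
  rw [List.range_eq_range', List.range'_succ]
  simp

theorem maximumEvenSplit_spec : Claim_unchanged_maximumEvenSplit := by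
  intro n _ hD
  unfold D_maximumEvenSplit at hD
  unfold maximumEvenSplit maximumEvenSplit_alt
  by_cases h2 : n % 2 = 0
  · have hn0 : 0 ≤ n := by by_contra h; exact hD (by omega)
    rw [if_pos h2]
    by_cases hz : n = 0
    · subst hz
      rw [pvLoopA]
      norm_num
    · have hn2 : 2 ≤ n := by omega
      rw [if_neg (by omega)]
      obtain ⟨hT0, hTle, hTgt⟩ := pvCountT_spec n 0 (by norm_num; omega)
      set T := pvCountT n 0 with hT
      have hT1 : 1 ≤ T := by
        by_contra h
        have : T = 0 := by omega
        rw [this] at hTgt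
        norm_num at hTgt
        omega
      have := pvLoopA_char n h2 T hT1 hTle hTgt (T - 1) 1 (by omega) (by omega)
      simp only [Nat.cast_one] at this
      have hA : pvLoopA n 2 (by omega) =
          (List.range' 1 (T - 1)).map (fun i : Nat => 2 * (i : Int)) ++ [n - (T : Int) * ((T : Int) - 1)] :=
        (pvLoopA_congr n 2 (by omega) (n - (1 : Int) * ((1 : Int) - 1)) (2 * (1 : Int)) (by omega)
          (by ring) (by ring)).trans this
      rw [hA]
      simp [rangeDrop T hT1]
  · rw [if_neg h2, if_pos (Or.inr h2)]

theorem maximumEvenSplit_changed : Claim_changed_maximumEvenSplit := by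
  unfold Claim_changed_maximumEvenSplit
  refine ⟨by decide, by decide, ?_, by decide, by decide⟩
  show maximumEvenSplit (-2) = [-2]
  unfold maximumEvenSplit
  rw [if_pos (by decide), pvLoopA]
  norm_num

theorem maximumEvenSplit_tight : Claim_exact_maximumEvenSplit := by
  intro n _ hD
  obtain ⟨hneg, h2⟩ := hD
  unfold maximumEvenSplit maximumEvenSplit_alt
  rw [if_pos h2, if_pos (by left; omega), pvLoopA]
  rw [dif_neg (by omega), if_pos (by omega)]
  simp
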